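-- pv_equiv track=rewrite | github.com/Nacho-Cola/coding-test | 프로그래머스/3/12938. 최고의 집합/최고의 집합.py | solution
-- ===== SOURCE A (Python) =====
-- def solution(n, s):
--     if n > s:
--         return [-1]
--     mod = s % n
--     answer = [s//n] * n
--
--     if mod == 0:
--         return answer
--
--     else :
--         for i in range(mod):
--             answer[i] += 1
--     return sorted(answer)
-- ===== SOURCE B (Python) =====
-- def solution(n, s):
--     if n > s:
--         return [-1]
--     out = []
--     while n > 0:
--         q = s // n
--         out.append(q)
--         s -= q
--         n -= 1
--     return out
-- ===== Notes on version B (the rewrite author's own statement) =====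
-- stated objective: alternative
-- what changed: B is a greedy one-pass loop: at each step it appends s//n (the smallest remaining element), subtracts it from s and decrements n, never computing s%n, never mutating entries and never sorting; A fills a uniform list, bumps the first s%n entries and sorts.
import Mathlib
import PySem

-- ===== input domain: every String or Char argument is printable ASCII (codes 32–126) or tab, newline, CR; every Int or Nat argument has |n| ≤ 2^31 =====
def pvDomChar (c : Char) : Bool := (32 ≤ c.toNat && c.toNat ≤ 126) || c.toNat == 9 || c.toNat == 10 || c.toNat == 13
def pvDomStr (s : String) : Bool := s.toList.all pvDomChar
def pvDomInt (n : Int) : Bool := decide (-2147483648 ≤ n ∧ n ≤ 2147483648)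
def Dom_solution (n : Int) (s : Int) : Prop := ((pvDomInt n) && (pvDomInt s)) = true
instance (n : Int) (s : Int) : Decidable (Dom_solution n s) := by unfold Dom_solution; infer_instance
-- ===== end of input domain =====

-- B replaces A's fill-uniform / bump-first-mod-entries / sort pipeline by a greedy one-pass
-- loop appending s//n and shrinking (s, n) each step (objective: alternative).

-- ===== PORT A =====
-- the loop 'for i in range(mod): answer[i] += 1': every i drawn from range(mod) is
-- nonnegative and in range on admitted inputs, so set/pyGetD at i is exact there
def solution (n : Int) (s : Int) : List Int :=
  if n > s then [-1]
  else
    let mod := PySem.Int.mod s n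
    let answer := List.replicate n.toNat (PySem.Int.floordiv s n)
    if mod = 0 then answer
    else
      let answer := (PySem.List.pyRange 0 mod 1).foldl
        (fun acc i => acc.set i.toNat (PySem.List.pyGetD acc i 0 + 1)) answer
      PySem.List.sorted answer (fun x => x) false

-- ===== PORT B =====
-- the 'while n > 0' loop of Source B; terminates since n decreases by 1 each iteration
def solutionAltLoop (n : Int) (s : Int) : List Int :=
  if _h : n > 0 then
    PySem.Int.floordiv s n :: solutionAltLoop (n - 1) (s - PySem.Int.floordiv s n)
  else []
termination_by n.toNat
decreasing_by omega

def solution_alt (n : Int) (s : Int) : List Int :=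
  if n > s then [-1]
  else solutionAltLoop n s

-- ===== PRECONDITION & SPEC =====
-- Pre_ excludes exactly n = 0 with 0 ≤ s, where Python A raises ZeroDivisionError on s % 0
def Pre_solution (n : Int) (s : Int) : Prop := ¬ (n = 0 ∧ 0 ≤ s)
instance (n : Int) (s : Int) : Decidable (Pre_solution n s) := by unfold Pre_solution; infer_instance
def pvWitness_solution : Int × Int := (3, 13)
def Spec_solution (n : Int) (s : Int) (out : List Int) : Prop := out = solution_alt n s
instance (n : Int) (s : Int) (out : List Int) : Decidable (Spec_solution n s out) := by unfold Spec_solution; infer_instance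

-- ===== CLAIM (what is proved, stated in full; the proofs are below) =====
def Claim_equal_solution : Prop := ∀ (n : Int) (s : Int), Dom_solution n s → Pre_solution n s → Spec_solution n s (solution n s)

-- ===== LEMMAS AND PROOFS =====

-- Python floor division/mod against an explicit quotient-remainder decomposition (positive divisor)
lemma fd_md_unique (n s q r : Int) (hn : 0 < n) (h : s = n * q + r) (h0 : 0 ≤ r) (h1 : r < n) :
    PySem.Int.floordiv s n = q ∧ PySem.Int.mod s n = r := by
  have hq : PySem.Int.floordiv s n = q := by
    rw [PySem.Int.floordiv_eq_iff_of_pos hn]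
    constructor <;> nlinarith
  refine ⟨hq, ?_⟩
  have := PySem.Int.floordiv_mul_add_mod s n
  rw [hq] at this
  nlinarith [this]

-- B's greedy loop produces, for 0 < n, exactly (n - s%n) copies of s//n then s%n copies of s//n + 1
lemma altLoop_eq (k : Nat) : ∀ (n s : Int), n.toNat = k → 0 < n →
    solutionAltLoop n s =
      List.replicate (n - PySem.Int.mod s n).toNat (PySem.Int.floordiv s n) ++
      List.replicate (PySem.Int.mod s n).toNat (PySem.Int.floordiv s n + 1) := by
  induction k with
  | zero => intro n s hk hn; omega
  | succ k ih =>
    intro n s hk hn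
    set q := PySem.Int.floordiv s n with hq
    set m := PySem.Int.mod s n with hm
    have hm0 : 0 ≤ m := PySem.Int.mod_nonneg (a := s) hn
    have hmlt : m < n := PySem.Int.mod_lt (a := s) hn
    have hdecomp : s = n * q + m := by
      have := PySem.Int.floordiv_mul_add_mod s n; rw [← hq, ← hm] at this; linarith
    rw [solutionAltLoop.eq_def, dif_pos hn, ← hq]
    by_cases h1 : n = 1
    · subst h1
      have hm' : m = 0 := by omega
      rw [solutionAltLoop.eq_def, dif_neg (by omega)]
      simp [hm']
    · have hn1 : 0 < n - 1 := by omega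
      by_cases hc : m < n - 1
      · -- remainder survives: s - q = (n-1)*q + m
        have hfd := fd_md_unique (n - 1) (s - q) q m hn1 (by linarith) hm0 hc
        rw [ih (n - 1) (s - q) (by omega) hn1, hfd.1, hfd.2]
        have h2 : (n - 1 - m).toNat + 1 = (n - m).toNat := by omega
        rw [← h2, List.replicate_succ, List.cons_append]
      · -- m = n - 1: s - q = (n-1)*(q+1), remainder 0
        have hmeq : m = n - 1 := by omega
        have hfd := fd_md_unique (n - 1) (s - q) (q + 1) 0 hn1 (by nlinarith [hdecomp, hmeq]) le_rfl hn1
        rw [ih (n - 1) (s - q) (by omega) hn1, hfd.1, hfd.2]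
        have h1' : (n - m).toNat = 1 := by omega
        have h2' : n.toNat - 1 = m.toNat := by omega
        simp [h1', List.replicate_succ, h2']

-- A's increment loop, run from position j upward over a list of nn entries whose first j
-- entries are already bumped, bumps exactly the first m entries
lemma loop_invariant (q : Int) (m nn : Nat) (hm : m ≤ nn) :
    ∀ (d j : Nat), j ≤ m → m - j = d →
    (PySem.List.pyRange (j : Int) (m : Int) 1).foldl
      (fun acc i => acc.set i.toNat (PySem.List.pyGetD acc i 0 + 1))
      (List.replicate j (q + 1) ++ List.replicate (nn - j) q)
    = List.replicate m (q + 1) ++ List.replicate (nn - m) q := by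
  intro d
  induction d with
  | zero =>
    intro j hj hd
    have : j = m := by omega
    subst this
    rw [PySem.List.pyRange_one_eq_nil (le_refl _)]
    rfl
  | succ d ih =>
    intro j hj hd
    have hjm : j < m := by omega
    have hjn : j < nn := by omega
    rw [PySem.List.pyRange_one_cons (by exact_mod_cast hjm)]
    rw [List.foldl_cons]
    have hlen : j < (List.replicate j (q + 1) ++ List.replicate (nn - j) q).length := by
      simp; omega
    have hget : PySem.List.pyGetD (List.replicate j (q + 1) ++ List.replicate (nn - j) q) (j : Int) 0
        = q := by
      rw [PySem.List.pyGetD_ofNat _ _ _ hlen]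
      rw [List.getElem_append_right (by simp)]
      simp
    rw [hget]
    have hset : (List.replicate j (q + 1) ++ List.replicate (nn - j) q).set (Int.toNat j) (q + 1)
        = List.replicate (j+1) (q + 1) ++ List.replicate (nn - (j+1)) q := by
      rw [Int.toNat_natCast, List.set_append_right j (q+1) (by simp)]
      simp only [List.length_replicate, Nat.sub_self]
      have : nn - j = (nn - (j+1)) + 1 := by omega
      rw [this, List.replicate_succ, List.set_cons_zero,
        List.replicate_succ' (n := j), List.append_assoc]
      rfl
    rw [hset]
    have : ((j : Int) + 1) = ((j + 1 : Nat) : Int) := by push_cast; ring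
    rw [this]
    exact ih (j+1) (by omega) (by omega)

-- ===== VERDICT (by name: the statement is the Claim_ definition above) =====
theorem solution_spec : Claim_equal_solution := by
  intro n s _ hpre
  unfold Spec_solution solution solution_alt
  by_cases hns : n > s
  · simp [hns]
  · simp only [hns, if_false]
    have hle : n ≤ s := by omega
    have hn0 : n ≠ 0 := by rintro rfl; exact hpre ⟨rfl, hle⟩
    set q := PySem.Int.floordiv s n with hq
    set m := PySem.Int.mod s n with hmdef
    rcases lt_or_gt_of_ne hn0 with hneg | hpos
    · -- n < 0 : both sides are the empty list
      have hmb := PySem.Int.mod_neg_bounds (a := s) hneg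
      have hnt : n.toNat = 0 := by omega
      rw [solutionAltLoop.eq_def, dif_neg (by omega)]
      by_cases hm0 : m = 0
      · simp [hm0, hnt]
      · have hmlt : m < 0 := by omega
        simp only [hm0, if_false]
        rw [PySem.List.pyRange_one_eq_nil (by omega), hnt]
        rfl
    · -- 0 < n
      have hm0le : 0 ≤ m := PySem.Int.mod_nonneg (a := s) hpos
      have hmlt : m < n := PySem.Int.mod_lt (a := s) hpos
      rw [altLoop_eq n.toNat n s rfl hpos, ← hq, ← hmdef]
      by_cases hm0 : m = 0
      · simp [hm0]
      · simp only [hm0, if_false]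
        have hcastm : m = ((m.toNat : Nat) : Int) := by omega
        have hloop := loop_invariant q m.toNat n.toNat (by omega) m.toNat 0 (by omega) (by omega)
        simp only [Nat.cast_zero, Nat.sub_zero, List.replicate_zero, List.nil_append] at hloop
        rw [hcastm, hloop]
        simp only [← hcastm]
        have hperm : (List.replicate (n - m).toNat q ++ List.replicate m.toNat (q + 1)).Perm
            (List.replicate m.toNat (q + 1) ++ List.replicate (n.toNat - m.toNat) q) := by
          have : (n - m).toNat = n.toNat - m.toNat := by omega
          rw [this]
          exact List.perm_append_comm
        have hpw : (List.replicate (n - m).toNat q ++ List.replicate m.toNat (q + 1)).Pairwise (· ≤ ·) := by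
          apply List.pairwise_append.mpr
          refine ⟨List.pairwise_replicate.mpr (by simp), List.pairwise_replicate.mpr (by simp), ?_⟩
          intro a ha b hb
          rw [List.eq_of_mem_replicate ha, List.eq_of_mem_replicate hb]
          omega
        exact (PySem.List.sorted_id_eq_of_perm_of_pairwise _ _ hperm hpw)
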